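-- pv_equiv track=rewrite | github.com/dasolit/baekjoon | 프로그래머스/2/389479. 서버 증설 횟수/서버 증설 횟수.py | solution
-- ===== SOURCE A (Python) =====
-- def solution(players, m, k):
--     T = len(players)
--     expire = [0] * (T + k + 1)
--     active = 0
--     answer = 0
--
--     for t in range(T):
--         active -= expire[t]
--
--         required = players[t] // m
--
--         if active < required:
--             add = required - active
--             active += add
--             answer += add
--             expire[t + k] += add
--
--     return answer
-- ===== SOURCE B (Python) =====
-- def solution(players, m, k):
--     # Prefix-sum DP: P[t] = total servers ever added among times 0..t.
--     # Adds made at time s expire at s+k, so at time t the expired total is P[t-k]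
--     # and P[t] = max(P[t-1], players[t] // m + P[t-k]); the answer is P[-1].
--     P = []
--     for t, p in enumerate(players):
--         prev = P[t - 1] if t >= 1 else 0
--         base = P[t - k] if t >= k else 0
--         P.append(max(prev, p // m + base))
--     return P[-1] if P else 0
-- ===== Notes on version B (the rewrite author's own statement) =====
-- stated objective: alternative
-- what changed: Replaces A's event simulation (a running active counter with an O(T+k) expiration array it writes at t+k and subtracts at t) with a prefix-sum dynamic program on cumulative additions: P[t] = max(P[t-1], players[t]//m + P[t-k]), answer = P[-1]; no active counter, no expiry bookkeeping, no branch on a shortfall.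
-- outside the precondition, e.g. on solution([2, 2], 1, 0): A returns 2, B raises IndexError; on solution([2, 2, 2], 1, -1): A returns 4, B raises IndexError
import Mathlib
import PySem

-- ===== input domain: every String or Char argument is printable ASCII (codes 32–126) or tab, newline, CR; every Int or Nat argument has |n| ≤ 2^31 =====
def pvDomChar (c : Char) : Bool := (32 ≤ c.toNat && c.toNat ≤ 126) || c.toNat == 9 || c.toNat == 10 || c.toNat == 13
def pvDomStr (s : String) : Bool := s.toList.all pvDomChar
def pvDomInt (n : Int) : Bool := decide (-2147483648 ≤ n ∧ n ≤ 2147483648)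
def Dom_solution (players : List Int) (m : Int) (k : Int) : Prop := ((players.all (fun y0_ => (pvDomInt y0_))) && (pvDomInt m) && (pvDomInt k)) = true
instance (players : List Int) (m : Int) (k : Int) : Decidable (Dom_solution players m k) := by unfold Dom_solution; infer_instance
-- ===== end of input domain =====

-- B replaces A's simulation (active counter + expiration array) with a prefix-sum dynamic
-- program on cumulative server additions: P[t] = max(P[t-1], players[t]//m + P[t-k]).

-- ===== PORT A =====
-- the body of A's 'for t in range(T)' loop, on state (expire, active, answer)
def solutionStepA (players : List Int) (m : Int) (k : Int)
    (st : List Int × Int × Int) (t : Int) : List Int × Int × Int :=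
  let active := st.2.1 - PySem.List.pyGetD st.1 t 0
  let required := PySem.Int.floordiv (PySem.List.pyGetD players t 0) m
  if active < required then
    let add := required - active
    (PySem.List.pySetD st.1 (t + k) (PySem.List.pyGetD st.1 (t + k) 0 + add),
     active + add, st.2.2 + add)
  else
    (st.1, active, st.2.2)

def solution (players : List Int) (m : Int) (k : Int) : Int :=
  let T : Int := players.length
  let expire : List Int := List.replicate (T + k + 1).toNat 0
  let st := (PySem.List.pyRange 0 T 1).foldl (solutionStepA players m k) (expire, 0, 0)
  st.2.2

-- ===== PORT B =====
-- the body of B's 'for t, p in enumerate(players)' loop: append the next prefix value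
def solutionStepB (m : Int) (k : Int) (P : List Int) (tp : Int × Int) : List Int :=
  let prev := if 1 ≤ tp.1 then PySem.List.pyGetD P (tp.1 - 1) 0 else 0
  let base := if k ≤ tp.1 then PySem.List.pyGetD P (tp.1 - k) 0 else 0
  P ++ [max prev (PySem.Int.floordiv tp.2 m + base)]

def solution_alt (players : List Int) (m : Int) (k : Int) : Int :=
  let P := (PySem.List.enumerate players 0).foldl (solutionStepB m k) ([] : List Int)
  if P = [] then 0 else PySem.List.pyGetD P (-1) 0

-- ===== PRECONDITION & SPEC =====
-- Pre_ excludes, on nonempty players: m = 0 (A raises ZeroDivisionError), k ≤ -2 (A raises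
-- IndexError), and k = 0 / k = -1, where A still returns a value (its array slot is written
-- after it was read, resp. reached by negative-index wraparound) but B's P[t-k] lookup
-- raises IndexError, so B returns no value there.
def Pre_solution (players : List Int) (m : Int) (k : Int) : Prop :=
  players = [] ∨ (m ≠ 0 ∧ 1 ≤ k)
instance (players : List Int) (m : Int) (k : Int) : Decidable (Pre_solution players m k) := by
  unfold Pre_solution; infer_instance

def pvWitness_solution : List Int × Int × Int := ([5, 2, 9, 4], 2, 2)

def Spec_solution (players : List Int) (m : Int) (k : Int) (out : Int) : Prop :=
  out = solution_alt players m k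
instance (players : List Int) (m : Int) (k : Int) (out : Int) : Decidable (Spec_solution players m k out) := by
  unfold Spec_solution; infer_instance

-- ===== CLAIM (what is proved, stated in full; the proofs are below) =====
def Claim_equal_solution : Prop := ∀ (players : List Int) (m : Int) (k : Int),
  Dom_solution players m k → Pre_solution players m k →
  Spec_solution players m k (solution players m k)

-- ===== LEMMAS AND PROOFS =====

-- getP P j = P[j] read as a cumulative function: 0 left of the list, getD 0 beyond it
def getP (P : List Int) (j : Int) : Int := if j < 0 then 0 else P.getD j.toNat 0

theorem getP_append_lt (P : List Int) (v : Int) (j : Int) (h : j < (P.length : Int)) :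
    getP (P ++ [v]) j = getP P j := by
  unfold getP
  split_ifs with hj
  · rfl
  · have hj' : j.toNat < P.length := by omega
    simp [List.getD_eq_getElem?_getD, List.getElem?_append_left hj']

theorem getP_append_self (P : List Int) (v : Int) :
    getP (P ++ [v]) (P.length : Int) = v := by
  unfold getP
  simp [List.getD_eq_getElem?_getD]

-- pyGetD at a nonnegative index, as getP
theorem pyGetD_nonneg_eq_getP (xs : List Int) (i : Int) (h : 0 ≤ i) :
    PySem.List.pyGetD xs i 0 = getP xs i := by
  unfold getP
  simp [PySem.List.pyGetD, PySem.List.pyGet?_of_nonneg xs h, List.getD_eq_getElem?_getD,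
    show ¬ i < 0 by omega]

-- reading a pySetD-updated list at nonnegative indices
theorem pyGetD_pySetD_int (xs : List Int) (i j v d : Int) (hi : 0 ≤ i) (hj : 0 ≤ j)
    (hjlen : j.toNat < xs.length) :
    PySem.List.pyGetD (PySem.List.pySetD xs j v) i d = if i = j then v else PySem.List.pyGetD xs i d := by
  rw [PySem.List.pySetD_of_nonneg xs v hj]
  rw [show PySem.List.pyGetD (xs.set j.toNat v) i d = (xs.set j.toNat v).getD i.toNat d by
        simp [PySem.List.pyGetD, PySem.List.pyGet?_of_nonneg _ hi, List.getD_eq_getElem?_getD],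
      show PySem.List.pyGetD xs i d = xs.getD i.toNat d by
        simp [PySem.List.pyGetD, PySem.List.pyGet?_of_nonneg _ hi, List.getD_eq_getElem?_getD],
      List.getD_eq_getElem?_getD, List.getD_eq_getElem?_getD, List.getElem?_set]
  by_cases h : i = j
  · simp [h, hjlen]
  · have : j.toNat ≠ i.toNat := by omega
    simp [h, this]

-- each B step appends exactly one element
theorem length_foldl_stepB (m k : Int) :
    ∀ (l : List (Int × Int)) (P : List Int),
      (l.foldl (solutionStepB m k) P).length = P.length + l.length := by
  intro l
  induction l with
  | nil => intro P; simp
  | cons hd tl ih =>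
    intro P
    rw [List.foldl_cons, ih]
    simp [solutionStepB]
    omega

-- the coupling: A's loop state is determined by B's prefix list P
theorem couple (players : List Int) (m : Int) (k : Int) (hk : 1 ≤ k) :
    ∀ (r : Nat) (a : Int) (expire P : List Int) (active answer : Int),
      0 ≤ a → (P.length : Int) = a → a + r ≤ (players.length : Int) →
      expire.length = ((players.length : Int) + k + 1).toNat →
      active = getP P (a - 1) - getP P (a - 1 - k) →
      answer = getP P (a - 1) →
      (∀ i : Int, a ≤ i → i < a + k →
        PySem.List.pyGetD expire i 0 = getP P (i - k) - getP P (i - k - 1)) →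
      (∀ i : Int, a + k ≤ i → PySem.List.pyGetD expire i 0 = 0) →
      ((PySem.List.pyRange a (a + r) 1).foldl (solutionStepA players m k) (expire, active, answer)).2.2
        = getP (((PySem.List.pyRange a (a + r) 1).map (fun j => (j, PySem.List.pyGetD players j 0))).foldl
            (solutionStepB m k) P) (a + r - 1) := by
  intro r
  induction r with
  | zero =>
    intro a expire P active answer _ _ _ _ hact hans _ _
    rw [show a + ((0 : Nat) : Int) = a by simp, PySem.List.pyRange_one_eq_nil (le_refl a)]
    simpa using hans
  | succ r ih =>
    intro a expire P active answer ha hlenP hr hexplen hact hans hexp1 hexp2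
    have hcast : a + ((r + 1 : Nat) : Int) = (a + 1) + (r : Nat) := by push_cast; ring
    rw [hcast, PySem.List.pyRange_one_cons (by omega), List.map_cons, List.foldl_cons, List.foldl_cons]
    -- abbreviations
    set q := getP P (a - 1) with hq
    set b0 := getP P (a - k) with hb0
    set req := PySem.Int.floordiv (PySem.List.pyGetD players a 0) m with hreq
    set newval := max q (req + b0) with hnewval
    -- the expire slot A reads at time a
    have hread : PySem.List.pyGetD expire a 0 = getP P (a - k) - getP P (a - k - 1) :=
      hexp1 a (le_refl a) (by omega)
    -- B's step at (a, players[a])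
    have hprev : (if 1 ≤ a then PySem.List.pyGetD P (a - 1) 0 else 0) = q := by
      split_ifs with h1
      · rw [pyGetD_nonneg_eq_getP P (a - 1) (by omega)]
      · rw [hq, show a = 0 by omega]; simp [getP]
    have hbase : (if k ≤ a then PySem.List.pyGetD P (a - k) 0 else 0) = b0 := by
      split_ifs with h1
      · rw [pyGetD_nonneg_eq_getP P (a - k) (by omega)]
      · rw [hb0]; unfold getP; simp [show a - k < 0 by omega]
    have hstepB : solutionStepB m k P (a, PySem.List.pyGetD players a 0) = P ++ [newval] := by
      simp only [solutionStepB, hprev, hbase, hnewval, hreq]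
    -- A's active after the subtraction: active2 = q - b0
    have hact2 : active - PySem.List.pyGetD expire a 0 = q - b0 := by
      rw [hread, hact]
      have h1 : a - 1 - k = a - k - 1 := by ring
      rw [h1]; ring
    -- facts about the appended list
    have hPlen : (P.length : Int) = a := hlenP
    have happ_lt : ∀ j : Int, j < a → getP (P ++ [newval]) j = getP P j := by
      intro j hj; exact getP_append_lt P newval j (by omega)
    have happ_self : getP (P ++ [newval]) a = newval := by
      have := getP_append_self P newval
      rwa [hPlen] at this
    have hlenP' : ((P ++ [newval]).length : Int) = a + 1 := by
      simp; omega
    have hr' : (a + 1) + (r : Nat) ≤ (players.length : Int) := by push_cast at hr ⊢; omega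
    rw [hstepB]
    by_cases hlt : q - b0 < req
    · -- shortfall branch: newval = req + b0
      have hnv : newval = req + b0 := max_eq_right (by omega)
      have hstepA : solutionStepA players m k (expire, active, answer) a
          = (PySem.List.pySetD expire (a + k)
               (PySem.List.pyGetD expire (a + k) 0 + (req - (q - b0))),
             (q - b0) + (req - (q - b0)), answer + (req - (q - b0))) := by
        simp only [solutionStepA]
        rw [hact2, ← hreq, if_pos hlt]
      rw [hstepA]
      -- the old slot at a + k is still 0
      have hold : PySem.List.pyGetD expire (a + k) 0 = 0 := hexp2 (a + k) (le_refl _)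
      have hakrange : (a + k).toNat < expire.length := by
        rw [hexplen]; omega
      refine (ih (a + 1)
        (PySem.List.pySetD expire (a + k)
          (PySem.List.pyGetD expire (a + k) 0 + (req - (q - b0))))
        (P ++ [newval]) _ _ (by omega) hlenP' hr' ?_ ?_ ?_ ?_ ?_).trans ?_
      · rw [PySem.List.length_pySetD]; exact hexplen
      · -- active invariant at a + 1
        rw [show a + 1 - 1 = a by ring, happ_self, happ_lt (a - k) (by omega), hnv]
        ring
      · -- answer invariant at a + 1
        rw [show a + 1 - 1 = a by ring, happ_self, hans, hnv, hq]
        ring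
      · -- hexp1 at a + 1
        intro i hi1 hi2
        rw [pyGetD_pySetD_int expire i (a + k) _ 0 (by omega) (by omega) hakrange]
        by_cases hik : i = a + k
        · rw [if_pos hik, hik, hold,
              show a + k - k = a by ring, happ_self,
              happ_lt (a - 1) (by omega), hnv, ← hq]
          ring
        · rw [if_neg hik,
              happ_lt (i - k) (by omega), happ_lt (i - k - 1) (by omega)]
          exact hexp1 i (by omega) (by omega)
      · -- hexp2 at a + 1
        intro i hi
        rw [pyGetD_pySetD_int expire i (a + k) _ 0 (by omega) (by omega) hakrange,
            if_neg (by omega)]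
        exact hexp2 i (by omega)
      · rw [show a + 1 + (r : Nat) - 1 = a + ((r + 1 : Nat) : Int) - 1 by push_cast; ring]
    · -- no shortfall: newval = q
      have hnv : newval = q := max_eq_left (by omega)
      have hstepA : solutionStepA players m k (expire, active, answer) a
          = (expire, q - b0, answer) := by
        simp only [solutionStepA]
        rw [hact2, ← hreq, if_neg hlt]
      rw [hstepA]
      refine (ih (a + 1) expire (P ++ [newval]) _ _ (by omega) hlenP' hr' hexplen ?_ ?_ ?_ ?_).trans ?_
      · rw [show a + 1 - 1 = a by ring, happ_self, happ_lt (a - k) (by omega), hnv]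
      · rw [show a + 1 - 1 = a by ring, happ_self, hans, hnv, hq]
      · intro i hi1 hi2
        by_cases hik : i = a + k
        · rw [hik, hexp2 (a + k) (le_refl _),
              show a + k - k = a by ring, happ_self,
              happ_lt (a - 1) (by omega), hnv, ← hq]
          ring
        · rw [happ_lt (i - k) (by omega), happ_lt (i - k - 1) (by omega)]
          exact hexp1 i (by omega) (by omega)
      · intro i hi
        exact hexp2 i (by omega)
      · rw [show a + 1 + (r : Nat) - 1 = a + ((r + 1 : Nat) : Int) - 1 by push_cast; ring]

-- ===== VERDICT (by name: the statement is the Claim_ definition above) =====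
theorem solution_spec : Claim_equal_solution := by
  intro players m k _ hpre
  unfold Spec_solution
  rcases hpre with hnil | ⟨_, hk⟩
  · subst hnil
    simp [solution, solution_alt, PySem.List.pyRange_one_eq_nil, PySem.List.enumerate_nil]
  · show solution players m k = solution_alt players m k
    unfold solution solution_alt
    rw [PySem.List.enumerate_eq_map_pyRange (d := 0)]
    have hc := couple players m k hk players.length 0
      (List.replicate (((players.length : Int) + k + 1).toNat) 0) [] 0 0
      (le_refl 0) (by simp) (by omega) (by simp)
      (by simp [getP]) (by simp [getP])
      (fun i hi _ => by
        rw [pyGetD_nonneg_eq_getP _ i hi]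
        unfold getP
        simp [List.getD_eq_getElem?_getD, List.getElem?_replicate]
        split_ifs <;> simp)
      (fun i hi => by
        rw [pyGetD_nonneg_eq_getP _ i (by omega)]
        unfold getP
        simp [List.getD_eq_getElem?_getD, List.getElem?_replicate]
        split_ifs <;> simp)
    simp only [zero_add] at hc
    set Pf := ((PySem.List.pyRange 0 (players.length : Int) 1).map
        (fun j => (j, PySem.List.pyGetD players j 0))).foldl (solutionStepB m k) [] with hPf
    have hlenPf : Pf.length = players.length := by
      rw [hPf, length_foldl_stepB]
      simp [PySem.List.length_pyRange_one]
    rw [hc]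
    show getP Pf ((players.length : Int) - 1)
        = if Pf = [] then 0 else PySem.List.pyGetD Pf (-1) 0
    by_cases hT : players.length = 0
    · have : Pf = [] := List.eq_nil_of_length_eq_zero (by omega)
      rw [if_pos this, this, hT]
      simp [getP]
    · have hne : Pf ≠ [] := by
        intro h; rw [h] at hlenPf; simp at hlenPf; omega
      rw [if_neg hne, PySem.List.pyGetD_neg_one Pf 0 hne]
      unfold getP
      have h1 : ¬ ((players.length : Int) - 1 < 0) := by omega
      rw [if_neg h1]
      have h2 : ((players.length : Int) - 1).toNat = Pf.length - 1 := by omega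
      rw [h2, List.getD_eq_getElem?_getD, List.getLast_eq_getElem,
          List.getElem?_eq_getElem (by omega)]
      simp
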